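-- pv_equiv track=rewrite | github.com/cnvogelg/amitools | amitools/util/HexDump.py | get_hex_diff_line
-- ===== SOURCE A (Python) =====
-- def _get_vis_char(d):
--     if d >= 32 and d < 127:
--         return "%c" % d
--     else:
--         return "."
--
-- def get_hex_diff_line(addr, a_line, b_line, indent=0, num=16):
--     na = len(a_line)
--     nb = len(b_line)
--     n = max(na, nb)
--     skip = num - n
--     out = " " * indent
--     out += "%08x: " % addr
--     ah = []
--     ac = []
--     bh = []
--     bc = []
--     for d in range(n):
--         av = a_line[d]
--         bv = b_line[d]
--         if av != bv:
--             ah.append("%02x" % av)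
--             ac.append(_get_vis_char(av))
--             bh.append("%02x" % bv)
--             bc.append(_get_vis_char(bv))
--         else:
--             ah.append("--")
--             ac.append(" ")
--             bh.append("--")
--             bc.append(" ")
--     for d in range(skip):
--         ah.append("  ")
--         ac.append(" ")
--         bh.append("  ")
--         bc.append(" ")
--     out += " ".join(ah) + "  " + "".join(ac) + " | "
--     out += " ".join(bh) + "  " + "".join(bc)
--     return out
-- ===== SOURCE B (Python) =====
-- def _vis(d):
--     return "%c" % d if 32 <= d < 127 else "."
--
-- def _side(own, other, n, skip):
--     cells = [("--", " ") if own[d] == other[d] else ("%02x" % own[d], _vis(own[d]))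
--              for d in range(n)]
--     cells += [("  ", " ")] * skip
--     return " ".join(h for h, _ in cells) + "  " + "".join(c for _, c in cells)
--
-- def get_hex_diff_line(addr, a_line, b_line, indent=0, num=16):
--     n = max(len(a_line), len(b_line))
--     return (" " * indent + "%08x: " % addr
--             + _side(a_line, b_line, n, num - n) + " | " + _side(b_line, a_line, n, num - n))
-- ===== Notes on version B (the rewrite author's own statement) =====
-- stated objective: simpler
-- what changed: Replaces A's single four-accumulator loop plus separate padding loop and four joins by one symmetric helper that renders a whole side from (hex,char) cell pairs and is called once per side.
import Mathlib
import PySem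

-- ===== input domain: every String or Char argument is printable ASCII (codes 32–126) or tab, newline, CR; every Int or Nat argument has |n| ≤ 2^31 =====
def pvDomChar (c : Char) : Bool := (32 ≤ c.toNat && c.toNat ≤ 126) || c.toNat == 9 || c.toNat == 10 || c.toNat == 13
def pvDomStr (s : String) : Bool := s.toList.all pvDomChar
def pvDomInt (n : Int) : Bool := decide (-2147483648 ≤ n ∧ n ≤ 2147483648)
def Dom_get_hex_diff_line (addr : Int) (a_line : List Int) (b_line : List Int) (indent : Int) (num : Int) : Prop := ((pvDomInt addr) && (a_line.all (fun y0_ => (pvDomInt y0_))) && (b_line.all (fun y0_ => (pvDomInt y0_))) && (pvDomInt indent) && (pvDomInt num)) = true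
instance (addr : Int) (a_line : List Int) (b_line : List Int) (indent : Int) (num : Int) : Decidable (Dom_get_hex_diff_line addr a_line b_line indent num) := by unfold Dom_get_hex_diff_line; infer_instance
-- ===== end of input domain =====

-- B renders each side with one symmetric helper producing (hex,char) cell pairs, called once per
-- side, instead of A's single four-accumulator loop; objective: simpler. Return value only.

-- shared primitive: Python's "%0<w>x" % v (lowercase hex, zero-padded to width w, sign first);
-- hand-ported, exact for every Int (PySem has no hex formatter)
def pvHexDigit (n : Nat) : Char := if n < 10 then Char.ofNat (48 + n) else Char.ofNat (87 + n)

-- structural fuel (= n itself, enough since n/16 < n) so the kernel can evaluate it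
def pvHexDigitsAux : Nat → Nat → List Char
  | 0, n => [pvHexDigit n]
  | fuel + 1, n =>
    if n < 16 then [pvHexDigit n]
    else pvHexDigitsAux fuel (n / 16) ++ [pvHexDigit (n % 16)]

def pvHexDigits (n : Nat) : List Char := pvHexDigitsAux n n

def pvHexPad (w : Nat) (v : Int) : List Char :=
  if v < 0 then
    let ds := pvHexDigits (-v).toNat
    '-' :: (List.replicate (w - 1 - ds.length) '0' ++ ds)
  else
    let ds := pvHexDigits v.toNat
    List.replicate (w - ds.length) '0' ++ ds

-- _get_vis_char, exact ("%c" % d = the character with code d on 32 ≤ d < 127)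
def pvVisChar (d : Int) : List Char :=
  if 32 ≤ d ∧ d < 127 then [Char.ofNat d.toNat] else ['.']

-- ===== PORT A =====
def get_hex_diff_line (addr : Int) (a_line : List Int) (b_line : List Int) (indent : Int) (num : Int) : String :=
  let na : Int := a_line.length
  let nb : Int := b_line.length
  let n : Int := max na nb
  let skip : Int := num - n
  let out0 : List Char := List.replicate indent.toNat ' ' ++ pvHexPad 8 addr ++ [':', ' ']
  let st1 := (PySem.List.pyRange 0 n 1).foldl
    (fun (st : List (List Char) × List (List Char) × List (List Char) × List (List Char)) d =>
      let av := PySem.List.pyGetD a_line d 0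
      let bv := PySem.List.pyGetD b_line d 0
      if av ≠ bv then
        (st.1 ++ [pvHexPad 2 av], st.2.1 ++ [pvVisChar av],
         st.2.2.1 ++ [pvHexPad 2 bv], st.2.2.2 ++ [pvVisChar bv])
      else
        (st.1 ++ [['-','-']], st.2.1 ++ [[' ']], st.2.2.1 ++ [['-','-']], st.2.2.2 ++ [[' ']]))
    ([], [], [], [])
  let st2 := (PySem.List.pyRange 0 skip 1).foldl
    (fun (st : List (List Char) × List (List Char) × List (List Char) × List (List Char)) _ =>
      (st.1 ++ [[' ',' ']], st.2.1 ++ [[' ']], st.2.2.1 ++ [[' ',' ']], st.2.2.2 ++ [[' ']]))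
    st1
  let out1 := out0 ++ List.intercalate [' '] st2.1 ++ [' ',' '] ++ st2.2.1.flatten ++ [' ','|',' ']
  let out2 := out1 ++ List.intercalate [' '] st2.2.2.1 ++ [' ',' '] ++ st2.2.2.2.flatten
  String.mk out2

-- ===== PORT B =====
def pvSide (own other : List Int) (n skip : Int) : List Char :=
  let cells := (PySem.List.pyRange 0 n 1).map
    (fun d => if PySem.List.pyGetD own d 0 = PySem.List.pyGetD other d 0
              then ((['-','-'] : List Char), ([' '] : List Char))
              else (pvHexPad 2 (PySem.List.pyGetD own d 0), pvVisChar (PySem.List.pyGetD own d 0)))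
  let cells := cells ++ List.replicate skip.toNat ([' ',' '], [' '])
  List.intercalate [' '] (cells.map Prod.fst) ++ [' ',' '] ++ (cells.map Prod.snd).flatten

def get_hex_diff_line_alt (addr : Int) (a_line : List Int) (b_line : List Int) (indent : Int) (num : Int) : String :=
  let n : Int := max (a_line.length : Int) (b_line.length : Int)
  String.mk (List.replicate indent.toNat ' ' ++ pvHexPad 8 addr ++ [':', ' ']
    ++ pvSide a_line b_line n (num - n) ++ [' ','|',' '] ++ pvSide b_line a_line n (num - n))

-- ===== PRECONDITION & SPEC =====
-- Pre_ excludes exactly the inputs where A raises IndexError: lines of different length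
-- (the loop runs to the longer length and indexes past the shorter list); B raises there too.
def Pre_get_hex_diff_line (addr : Int) (a_line : List Int) (b_line : List Int) (indent : Int) (num : Int) : Prop :=
  a_line.length = b_line.length
instance (addr : Int) (a_line : List Int) (b_line : List Int) (indent : Int) (num : Int) : Decidable (Pre_get_hex_diff_line addr a_line b_line indent num) := by unfold Pre_get_hex_diff_line; infer_instance

def pvWitness_get_hex_diff_line : Int × List Int × List Int × Int × Int := (3, [65, 66], [65, 67], 1, 4)

def Spec_get_hex_diff_line (addr : Int) (a_line : List Int) (b_line : List Int) (indent : Int) (num : Int) (out : String) : Prop := out = get_hex_diff_line_alt addr a_line b_line indent num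
instance (addr : Int) (a_line : List Int) (b_line : List Int) (indent : Int) (num : Int) (out : String) : Decidable (Spec_get_hex_diff_line addr a_line b_line indent num out) := by unfold Spec_get_hex_diff_line; infer_instance

-- ===== CLAIM (what is proved, stated in full; the proofs are below) =====
def Claim_equal_get_hex_diff_line : Prop := ∀ (addr : Int) (a_line : List Int) (b_line : List Int) (indent : Int) (num : Int), Dom_get_hex_diff_line addr a_line b_line indent num → Pre_get_hex_diff_line addr a_line b_line indent num → Spec_get_hex_diff_line addr a_line b_line indent num (get_hex_diff_line addr a_line b_line indent num)

-- ===== LEMMAS AND PROOFS =====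

-- the four-accumulator append loop is four maps
theorem pvFoldl4 {α β : Type} (l : List α) (g1 g2 g3 g4 : α → β)
    (p q r s : List β) :
    l.foldl (fun (st : List β × List β × List β × List β) x =>
        (st.1 ++ [g1 x], st.2.1 ++ [g2 x], st.2.2.1 ++ [g3 x], st.2.2.2 ++ [g4 x])) (p, q, r, s)
      = (p ++ l.map g1, q ++ l.map g2, r ++ l.map g3, s ++ l.map g4) := by
  induction l generalizing p q r s with
  | nil => simp
  | cons a t ih => simp [List.foldl_cons, ih]

theorem get_hex_diff_line_spec : Claim_equal_get_hex_diff_line := by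
  intro addr a_line b_line indent num _ hpre
  simp only [Spec_get_hex_diff_line, get_hex_diff_line, get_hex_diff_line_alt, pvSide]
  -- push A's branch from the state level into each component
  have hfun : (fun (st : List (List Char) × List (List Char) × List (List Char) × List (List Char)) (d : Int) =>
      let av := PySem.List.pyGetD a_line d 0
      let bv := PySem.List.pyGetD b_line d 0
      if av ≠ bv then
        (st.1 ++ [pvHexPad 2 av], st.2.1 ++ [pvVisChar av],
         st.2.2.1 ++ [pvHexPad 2 bv], st.2.2.2 ++ [pvVisChar bv])
      else
        (st.1 ++ [['-','-']], st.2.1 ++ [[' ']], st.2.2.1 ++ [['-','-']], st.2.2.2 ++ [[' ']]))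
      = (fun st d =>
        (st.1 ++ [if PySem.List.pyGetD a_line d 0 ≠ PySem.List.pyGetD b_line d 0 then pvHexPad 2 (PySem.List.pyGetD a_line d 0) else ['-','-']],
         st.2.1 ++ [if PySem.List.pyGetD a_line d 0 ≠ PySem.List.pyGetD b_line d 0 then pvVisChar (PySem.List.pyGetD a_line d 0) else [' ']],
         st.2.2.1 ++ [if PySem.List.pyGetD a_line d 0 ≠ PySem.List.pyGetD b_line d 0 then pvHexPad 2 (PySem.List.pyGetD b_line d 0) else ['-','-']],
         st.2.2.2 ++ [if PySem.List.pyGetD a_line d 0 ≠ PySem.List.pyGetD b_line d 0 then pvVisChar (PySem.List.pyGetD b_line d 0) else [' ']])) := by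
    funext st d
    by_cases h : PySem.List.pyGetD a_line d 0 = PySem.List.pyGetD b_line d 0 <;> simp [h]
  rw [hfun, pvFoldl4, pvFoldl4]
  -- B's cell-pair projections are exactly A's four maps
  have hA1 : ((PySem.List.pyRange 0 (max (a_line.length : Int) (b_line.length : Int)) 1).map
      (fun d => if PySem.List.pyGetD a_line d 0 = PySem.List.pyGetD b_line d 0
                then ((['-','-'] : List Char), ([' '] : List Char))
                else (pvHexPad 2 (PySem.List.pyGetD a_line d 0), pvVisChar (PySem.List.pyGetD a_line d 0)))).map Prod.fst
      = (PySem.List.pyRange 0 (max (a_line.length : Int) (b_line.length : Int)) 1).map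
        (fun d => if PySem.List.pyGetD a_line d 0 ≠ PySem.List.pyGetD b_line d 0 then pvHexPad 2 (PySem.List.pyGetD a_line d 0) else ['-','-']) := by
    rw [List.map_map]; apply List.map_congr_left; intro d _
    by_cases h : PySem.List.pyGetD a_line d 0 = PySem.List.pyGetD b_line d 0 <;> simp [Function.comp, h]
  have hA2 : ((PySem.List.pyRange 0 (max (a_line.length : Int) (b_line.length : Int)) 1).map
      (fun d => if PySem.List.pyGetD a_line d 0 = PySem.List.pyGetD b_line d 0
                then ((['-','-'] : List Char), ([' '] : List Char))
                else (pvHexPad 2 (PySem.List.pyGetD a_line d 0), pvVisChar (PySem.List.pyGetD a_line d 0)))).map Prod.snd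
      = (PySem.List.pyRange 0 (max (a_line.length : Int) (b_line.length : Int)) 1).map
        (fun d => if PySem.List.pyGetD a_line d 0 ≠ PySem.List.pyGetD b_line d 0 then pvVisChar (PySem.List.pyGetD a_line d 0) else [' ']) := by
    rw [List.map_map]; apply List.map_congr_left; intro d _
    by_cases h : PySem.List.pyGetD a_line d 0 = PySem.List.pyGetD b_line d 0 <;> simp [Function.comp, h]
  have hB1 : ((PySem.List.pyRange 0 (max (a_line.length : Int) (b_line.length : Int)) 1).map
      (fun d => if PySem.List.pyGetD b_line d 0 = PySem.List.pyGetD a_line d 0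
                then ((['-','-'] : List Char), ([' '] : List Char))
                else (pvHexPad 2 (PySem.List.pyGetD b_line d 0), pvVisChar (PySem.List.pyGetD b_line d 0)))).map Prod.fst
      = (PySem.List.pyRange 0 (max (a_line.length : Int) (b_line.length : Int)) 1).map
        (fun d => if PySem.List.pyGetD a_line d 0 ≠ PySem.List.pyGetD b_line d 0 then pvHexPad 2 (PySem.List.pyGetD b_line d 0) else ['-','-']) := by
    rw [List.map_map]; apply List.map_congr_left; intro d _
    by_cases h : PySem.List.pyGetD a_line d 0 = PySem.List.pyGetD b_line d 0 <;> simp [Function.comp, h, eq_comm]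
  have hB2 : ((PySem.List.pyRange 0 (max (a_line.length : Int) (b_line.length : Int)) 1).map
      (fun d => if PySem.List.pyGetD b_line d 0 = PySem.List.pyGetD a_line d 0
                then ((['-','-'] : List Char), ([' '] : List Char))
                else (pvHexPad 2 (PySem.List.pyGetD b_line d 0), pvVisChar (PySem.List.pyGetD b_line d 0)))).map Prod.snd
      = (PySem.List.pyRange 0 (max (a_line.length : Int) (b_line.length : Int)) 1).map
        (fun d => if PySem.List.pyGetD a_line d 0 ≠ PySem.List.pyGetD b_line d 0 then pvVisChar (PySem.List.pyGetD b_line d 0) else [' ']) := by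
    rw [List.map_map]; apply List.map_congr_left; intro d _
    by_cases h : PySem.List.pyGetD a_line d 0 = PySem.List.pyGetD b_line d 0 <;> simp [Function.comp, h, eq_comm]
  simp only [List.map_append, List.map_replicate, hA1, hA2, hB1, hB2, List.nil_append,
    List.map_const', PySem.List.length_pyRange_one]
  refine congrArg String.mk ?_
  simp [List.append_assoc]

-- ===== VERDICT (by name: the statement is the Claim_ definition above) =====
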